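-- pv_equiv track=rewrite | github.com/ZnnnnnH2/Python-design-and-ai-learning | 2022midtest/E.py | dedup_2
-- ===== SOURCE A (Python) =====
-- def dedup_2(list_a):
-- 	dic = {}
-- 	ans = []
-- 	for i in list_a:
-- 		if i not in dic:
-- 			dic[i] = 1
-- 			ans.append(i)
-- 		else:
-- 			dic[i] += 1
-- 			if dic[i] <= 2:
-- 				ans.append(i)
-- 	return ans
-- ===== SOURCE B (Python) =====
-- def dedup_2(list_a):
-- 	remaining = {}
-- 	for x in list_a:
-- 		remaining[x] = remaining.get(x, 0) + 1
-- 	out = []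
-- 	for x in reversed(list_a):
-- 		remaining[x] -= 1
-- 		if remaining[x] < 2:
-- 			out.append(x)
-- 	out.reverse()
-- 	return out
-- ===== Notes on version B (the rewrite author's own statement) =====
-- stated objective: alternative
-- what changed: Replaces A's forward single pass with a capped per-key counter by a two-stage algorithm: first build a full occurrence counter of the whole list, then traverse the list BACKWARDS decrementing the counter so it holds the number of earlier occurrences, keep an element when that is < 2, and reverse the collected output at the end.
import Mathlib
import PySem

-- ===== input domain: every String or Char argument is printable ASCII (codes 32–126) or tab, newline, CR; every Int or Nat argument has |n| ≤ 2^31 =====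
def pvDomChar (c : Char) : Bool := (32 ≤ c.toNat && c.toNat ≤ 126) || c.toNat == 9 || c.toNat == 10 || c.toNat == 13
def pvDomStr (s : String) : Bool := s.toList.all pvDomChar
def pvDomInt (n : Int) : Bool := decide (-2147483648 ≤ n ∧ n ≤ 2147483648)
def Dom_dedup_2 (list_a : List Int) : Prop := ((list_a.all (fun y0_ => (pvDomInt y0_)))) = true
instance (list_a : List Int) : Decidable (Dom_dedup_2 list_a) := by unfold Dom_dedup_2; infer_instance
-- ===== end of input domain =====

-- B replaces A's forward pass with a capped dict counter by a two-stage algorithm: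
-- count all occurrences first, then walk the list backwards decrementing the counter
-- (so it holds the number of EARLIER occurrences), keep when that is < 2, and
-- reverse the output (objective: alternative, same asymptotic cost).

-- ===== PORT A =====
def dedup_2 (list_a : List Int) : List Int :=
  (list_a.foldl
    (fun (st : PySem.Dict Int Int × List Int) i =>
      if st.1.contains i = false then
        (st.1.insert i 1, st.2 ++ [i])
      else
        let c := st.1.getD i 0 + 1
        let dic' := st.1.insert i c
        if c ≤ 2 then (dic', st.2 ++ [i]) else (dic', st.2))
    (PySem.Dict.empty, [])).2

-- ===== PORT B =====
def dedup_2_alt (list_a : List Int) : List Int :=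
  let remaining : PySem.Dict Int Int :=
    list_a.foldl (fun d x => d.insert x (d.getD x 0 + 1)) PySem.Dict.empty
  let st :=
    list_a.reverse.foldl
      (fun (st : PySem.Dict Int Int × List Int) x =>
        let r := st.1.getD x 0 - 1
        let d' := st.1.insert x r
        if r < 2 then (d', st.2 ++ [x]) else (d', st.2))
      (remaining, [])
  st.2.reverse

-- ===== PRECONDITION & SPEC =====
def Spec_dedup_2 (list_a : List Int) (out : List Int) : Prop := out = dedup_2_alt list_a
instance (list_a : List Int) (out : List Int) : Decidable (Spec_dedup_2 list_a out) := by unfold Spec_dedup_2; infer_instance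

-- ===== CLAIM (what is proved, stated in full; the proofs are below) =====
def Claim_equal_dedup_2 : Prop := ∀ (list_a : List Int), Dom_dedup_2 list_a → Spec_dedup_2 list_a (dedup_2 list_a)

-- ===== LEMMAS AND PROOFS =====

-- Common specification: keep each element iff it has fewer than two occurrences in
-- the (whole-input) prefix before it; p is the already-processed prefix.
def pvFilt (p : List Int) : List Int → List Int
  | [] => []
  | x :: s => (if (p.count x : Int) < 2 then [x] else []) ++ pvFilt (p ++ [x]) s

theorem pvFilt_append_singleton (s : List Int) (p : List Int) (x : Int) :
    pvFilt p (s ++ [x]) =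
      pvFilt p s ++ (if ((p ++ s).count x : Int) < 2 then [x] else []) := by
  induction s generalizing p with
  | nil => simp [pvFilt]
  | cons y s ih => simp [pvFilt, ih, List.append_assoc]

-- A's fold computes pvFilt.
theorem pvA_fold (s : List Int) (d : PySem.Dict Int Int) (a p : List Int)
    (hg : ∀ x : Int, d.getD x 0 = (p.count x : Int))
    (hc : ∀ x : Int, d.contains x = true ↔ p.count x ≠ 0) :
    (s.foldl
      (fun (st : PySem.Dict Int Int × List Int) i =>
        if st.1.contains i = false then
          (st.1.insert i 1, st.2 ++ [i])
        else
          let c := st.1.getD i 0 + 1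
          let dic' := st.1.insert i c
          if c ≤ 2 then (dic', st.2 ++ [i]) else (dic', st.2))
      (d, a)).2 = a ++ pvFilt p s := by
  induction s generalizing d a p with
  | nil => simp [pvFilt]
  | cons i s ih =>
    simp only [List.foldl_cons]
    by_cases hci : d.contains i = false
    · have hcnt : p.count i = 0 := by
        by_contra h
        have := (hc i).mpr h
        rw [hci] at this; cases this
      rw [if_pos hci]
      rw [ih _ _ (p ++ [i])
        (by
          intro x
          by_cases hx : x = i
          · subst hx; simp [hcnt]
          · simp [PySem.Dict.getD_insert, hx, hg x, Ne.symm hx])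
        (by
          intro x
          by_cases hx : x = i
          · subst hx; simp
          · simp [PySem.Dict.contains_insert, hx, hc x, Ne.symm hx])]
      simp [pvFilt, hcnt]
    · have hct : d.contains i = true := by
        cases h : d.contains i with
        | false => exact absurd h hci
        | true => rfl
      have hcnt : p.count i ≠ 0 := (hc i).mp hct
      rw [if_neg hci]
      have h1 : ∀ x : Int, (d.insert i (d.getD i 0 + 1)).getD x 0 = (((p ++ [i]).count x : Nat) : Int) := by
        intro x
        by_cases hx : x = i
        · subst hx; simp [hg x]
        · simp [PySem.Dict.getD_insert, hx, hg x, Ne.symm hx]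
      have h2 : ∀ x : Int, (d.insert i (d.getD i 0 + 1)).contains x = true ↔ (p ++ [i]).count x ≠ 0 := by
        intro x
        by_cases hx : x = i
        · subst hx; simp
        · simp [PySem.Dict.contains_insert, hx, hc x, Ne.symm hx]
      by_cases hle : d.getD i 0 + 1 ≤ 2
      · simp only [hle, if_true]
        rw [ih _ (a ++ [i]) (p ++ [i]) h1 h2]
        have : (p.count i : Int) < 2 := by have := hg i; omega
        simp [pvFilt, this]
      · simp only [hle, if_false]
        rw [ih _ a (p ++ [i]) h1 h2]
        have : ¬ ((p.count i : Int) < 2) := by have := hg i; omega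
        simp [pvFilt, this]

-- B's backward fold over r computes (pvFilt p r.reverse).reverse.
theorem pvB_fold (r : List Int) (p : List Int) (d : PySem.Dict Int Int) (a : List Int)
    (hg : ∀ x : Int, d.getD x 0 = (p.count x : Int) + (r.count x : Int)) :
    (r.foldl
      (fun (st : PySem.Dict Int Int × List Int) x =>
        let rr := st.1.getD x 0 - 1
        let d' := st.1.insert x rr
        if rr < 2 then (d', st.2 ++ [x]) else (d', st.2))
      (d, a)).2 = a ++ (pvFilt p r.reverse).reverse := by
  induction r generalizing p d a with
  | nil => simp [pvFilt]
  | cons x r ih =>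
    simp only [List.foldl_cons]
    have hx : d.getD x 0 - 1 = (p.count x : Int) + (r.count x : Int) := by
      have := hg x; simp at this; omega
    have hg' : ∀ y : Int,
        (d.insert x (d.getD x 0 - 1)).getD y 0 = (p.count y : Int) + (r.count y : Int) := by
      intro y
      by_cases hy : y = x
      · subst hy; simp [hx]
      · have := hg y
        simp [Ne.symm hy] at this
        simp [PySem.Dict.getD_insert, hy, this]
    have hfilt : pvFilt p (r.reverse ++ [x]) =
        pvFilt p r.reverse ++ (if ((p ++ r.reverse).count x : Int) < 2 then [x] else []) :=
      pvFilt_append_singleton r.reverse p x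
    have hcnt : ((p ++ r.reverse).count x : Int) = (p.count x : Int) + (r.count x : Int) := by
      simp [List.count_append, List.count_reverse]
    by_cases hlt : d.getD x 0 - 1 < 2
    · simp only [hlt, if_true]
      rw [ih p _ (a ++ [x]) hg']
      simp only [List.reverse_cons, hfilt, hcnt]
      rw [if_pos (by omega : ((p.count x : Int) + (r.count x : Int)) < 2)]
      simp
    · simp only [hlt, if_false]
      rw [ih p _ a hg']
      simp only [List.reverse_cons, hfilt, hcnt]
      rw [if_neg (by omega : ¬ ((p.count x : Int) + (r.count x : Int)) < 2)]
      simp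

theorem pvA_eq_filt (l : List Int) : dedup_2 l = pvFilt [] l := by
  unfold dedup_2
  rw [pvA_fold l PySem.Dict.empty [] []
    (by intro x; simp [PySem.Dict.getD_empty])
    (by intro x; simp [PySem.Dict.contains_empty])]
  simp

theorem pvB_eq_filt (l : List Int) : dedup_2_alt l = pvFilt [] l := by
  unfold dedup_2_alt
  simp only
  rw [PySem.Dict.foldl_insert_getD_add_one_eq_counter]
  rw [pvB_fold l.reverse [] (PySem.Dict.counter l) []
    (by intro x; simp [PySem.Dict.getD_counter, List.count_reverse])]
  simp

-- ===== VERDICT (by name: the statement is the Claim_ definition above) =====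
theorem dedup_2_spec : Claim_equal_dedup_2 := by
  intro l _
  unfold Spec_dedup_2
  rw [pvA_eq_filt, pvB_eq_filt]
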